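-- pv_equiv track=rewrite | github.com/zero-meta/EasyClangComplete | plugin/clang/utils.py | cleanup_comment
-- ===== SOURCE A (Python) =====
-- def cleanup_comment(raw_comment):
--     """Cleanup raw doxygen comment."""
--     def pop_prepending_empty_lines(lines):
--         first_non_empty_line_idx = 0
--         for line in lines:
--             if line == '':
--                 first_non_empty_line_idx += 1
--             else:
--                 break
--         return lines[first_non_empty_line_idx:]
--
--     import string
--     lines = raw_comment.split('\n')
--     chars_to_strip = '/' + '*' + string.whitespace
--     lines = [line.lstrip(chars_to_strip) for line in lines]
--     lines = pop_prepending_empty_lines(lines)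
--     clean_lines = []
--     is_brief_comment = True
--     for line in lines:
--         if line == '' and is_brief_comment:
--             # Skip lines that belong to brief comment.
--             is_brief_comment = False
--             continue
--         if is_brief_comment:
--             continue
--         clean_lines.append(line)
--     return '<br>'.join(clean_lines)
-- ===== SOURCE B (Python) =====
-- def cleanup_comment(raw_comment):
--     """Cleanup raw doxygen comment."""
--     # '/' + '*' + string.whitespace minus '\n' (a newline is never inside a line,
--     # it is the line boundary itself, handled by resetting the skipping flag).
--     junk = '/* \t\r\x0b\x0c'
--     chars = []
--     skipping = True
--     for ch in raw_comment:
--         if ch == '\n':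
--             chars.append(ch)
--             skipping = True
--         elif skipping and ch in junk:
--             pass
--         else:
--             chars.append(ch)
--             skipping = False
--     text = ''.join(chars).lstrip('\n')
--     _head, sep, tail = text.partition('\n\n')
--     if not sep:
--         return ''
--     return ''.join('<br>' if ch == '\n' else ch for ch in tail)
-- ===== Notes on version B (the rewrite author's own statement) =====
-- stated objective: alternative
-- what changed: Replaces A's split-into-lines + per-line lstrip + pop-leading-empties helper + brief/detail boolean state-machine over the list of lines by a character-level streaming pass over the raw string (a skipping flag reset at each newline), then an lstrip of leading newlines, a partition at the first blank-line separator and a per-character rendering of newlines as HTML breaks in the tail; no list of lines is ever built.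
import Mathlib
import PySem

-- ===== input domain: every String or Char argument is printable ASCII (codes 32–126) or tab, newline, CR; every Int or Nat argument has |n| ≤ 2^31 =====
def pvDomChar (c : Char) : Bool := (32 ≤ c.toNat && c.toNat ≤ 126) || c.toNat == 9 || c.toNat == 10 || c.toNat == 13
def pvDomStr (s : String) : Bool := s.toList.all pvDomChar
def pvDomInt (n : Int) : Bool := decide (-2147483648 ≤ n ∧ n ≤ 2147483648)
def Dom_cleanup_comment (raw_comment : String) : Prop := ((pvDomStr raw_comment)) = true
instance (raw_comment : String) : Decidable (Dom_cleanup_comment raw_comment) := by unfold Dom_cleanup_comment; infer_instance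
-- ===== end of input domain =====

-- B replaces A's split-into-lines + per-line lstrip + pop-empties helper + line state machine by one
-- character-level streaming pass over the raw string, then a partition on the first blank line
-- (objective: alternative decomposition, same cost).

-- ===== PORT A =====
-- exact port of Python's str.lstrip('/' + '*' + string.whitespace) on one line
def pvStripChars : List Char := ['/', '*', ' ', '\t', '\n', '\x0B', '\x0C', '\r']
def pvLstrip (cs : List Char) : List Char := cs.dropWhile (fun c => pvStripChars.contains c)

-- the counting loop of pop_prepending_empty_lines (breaks at the first non-empty line)
def pvPopLoop : List (List Char) → Nat → Nat
  | [], n => n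
  | l :: ls, n => if l == [] then pvPopLoop ls (n + 1) else n

-- one iteration of A's brief/detail loop over state (clean_lines, is_brief_comment)
def pvStep (st : List (List Char) × Bool) (line : List Char) : List (List Char) × Bool :=
  if line == [] && st.2 then (st.1, false)
  else if st.2 then st
  else (st.1 ++ [line], st.2)

def cleanup_comment (raw_comment : String) : String :=
  let lines := (PySem.Chars.splitOn raw_comment.toList ['\n']).map pvLstrip
  let lines := PySem.List.slice lines (some (pvPopLoop lines 0 : Int)) none
  let res := lines.foldl pvStep ([], true)
  String.ofList (PySem.Chars.join "<br>".toList res.1)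

-- ===== PORT B =====
-- Source B's literal `junk` = '/' + '*' + string.whitespace minus '\n'
def pvJunk : List Char := ['/', '*', ' ', '\t', '\r', '\x0B', '\x0C']

-- Source B's for-loop over the characters with the `skipping` flag
def pvScan : List Char → Bool → List Char
  | [], _ => []
  | c :: cs, skipping =>
    if c = '\n' then '\n' :: pvScan cs true
    else if skipping && pvJunk.contains c then pvScan cs skipping
    else c :: pvScan cs false

-- text.partition('\n\n') ported by hand (no PySem primitive): the part after the first
-- occurrence of "\n\n", or none when there is none (Source B uses only sep-emptiness and the tail)
def pvPartNN : List Char → Option (List Char)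
  | [] => none
  | c :: cs => if c = '\n' ∧ cs.head? = some '\n' then some cs.tail else pvPartNN cs

-- one character of Source B's final join-generator ('<br>' if ch == '\n' else ch)
def pvRepl (c : Char) : List Char := if c = '\n' then "<br>".toList else [c]

def cleanup_comment_alt (raw_comment : String) : String :=
  let text := pvScan raw_comment.toList true
  let text := text.dropWhile (· == '\n')
  match pvPartNN text with
  | none => ""
  | some tl => String.ofList (tl.flatMap pvRepl)

-- ===== PRECONDITION & SPEC =====
def Spec_cleanup_comment (raw_comment : String) (out : String) : Prop := out = cleanup_comment_alt raw_comment
instance (raw_comment : String) (out : String) : Decidable (Spec_cleanup_comment raw_comment out) := by unfold Spec_cleanup_comment; infer_instance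

-- ===== CLAIM (what is proved, stated in full; the proofs are below) =====
def Claim_equal_cleanup_comment : Prop := ∀ (raw_comment : String), Dom_cleanup_comment raw_comment → Spec_cleanup_comment raw_comment (cleanup_comment raw_comment)

-- ===== LEMMAS AND PROOFS =====

def mySplit : List Char → List (List Char)
  | [] => [[]]
  | c :: cs =>
    if c = '\n' then [] :: mySplit cs
    else match mySplit cs with
      | p :: ps => (c :: p) :: ps
      | [] => [[c]]

theorem mySplit_ne_nil (cs : List Char) : mySplit cs ≠ [] := by
  cases cs with
  | nil => simp [mySplit]
  | cons c cs =>
      simp only [mySplit]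
      split
      · simp
      · split <;> simp_all

theorem splitOn_go_spec :
    ∀ fuel l cur acc, l.length < fuel →
      PySem.Chars.splitOn.go ['\n'] fuel l cur acc =
        acc.reverse ++ (match mySplit l with
          | p :: ps => (cur.reverse ++ p) :: ps
          | [] => [cur.reverse]) := by
  intro fuel
  induction fuel with
  | zero => intro l cur acc h; omega
  | succ f ih =>
      intro l cur acc h
      cases l with
      | nil =>
          rw [PySem.Chars.splitOn.go.eq_def]
          simp [mySplit]
      | cons c rest =>
          rw [PySem.Chars.splitOn.go.eq_def]
          by_cases hc : c = '\n'
          · subst hc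
            have hpre : (['\n'] : List Char).isPrefixOf ('\n' :: rest) = true := by
              simp [List.isPrefixOf]
            simp only [hpre, if_pos, List.length_cons, List.drop_succ_cons, List.length_nil, List.drop_zero]
            rw [ih rest [] _ (by simp at h ⊢; omega)]
            cases hms : mySplit rest with
            | nil => exact absurd hms (mySplit_ne_nil rest)
            | cons p ps => simp [mySplit, hms]
          · have hpre : (['\n'] : List Char).isPrefixOf (c :: rest) = false := by
              simp [List.isPrefixOf]
              exact fun h => absurd h.symm hc
            simp only [hpre, Bool.false_eq_true, if_false]
            rw [ih rest (c :: cur) acc (by simp at h ⊢; omega)]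
            cases hms : mySplit rest with
            | nil => exact absurd hms (mySplit_ne_nil rest)
            | cons p ps => simp [mySplit, hc, hms]

theorem splitOn_eq_mySplit (cs : List Char) :
    PySem.Chars.splitOn cs ['\n'] = mySplit cs := by
  show PySem.Chars.splitOn.go ['\n'] (cs.length + 1) cs [] [] = mySplit cs
  rw [splitOn_go_spec (cs.length + 1) cs [] [] (by omega)]
  cases hms : mySplit cs with
  | nil => exact absurd hms (mySplit_ne_nil cs)
  | cons p ps => simp

theorem mem_mySplit_no_nl (cs : List Char) : ∀ p ∈ mySplit cs, '\n' ∉ p := by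
  induction cs with
  | nil => simp [mySplit]
  | cons c cs ih =>
      intro p hp
      simp only [mySplit] at hp
      by_cases hc : c = '\n'
      · simp only [hc, if_true] at hp
        rcases List.mem_cons.mp hp with h | h
        · simp [h]
        · exact ih p h
      · simp only [hc, ite_false] at hp
        cases hms : mySplit cs with
        | nil => exact absurd hms (mySplit_ne_nil cs)
        | cons q qs =>
            rw [hms] at hp
            rcases List.mem_cons.mp hp with h | h
            · subst h
              intro hmem
              rcases List.mem_cons.mp hmem with h2 | h2
              · exact hc h2.symm
              · exact ih q (by simp [hms]) h2
            · exact ih p (by simp [hms, h])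

theorem join_cons_ne_nil (p : List Char) (ps : List (List Char)) (h : ps ≠ []) :
    PySem.Chars.join ['\n'] (p :: ps) = p ++ '\n' :: PySem.Chars.join ['\n'] ps := by
  cases ps with
  | nil => exact absurd rfl h
  | cons q qs => rw [PySem.Chars.join_cons_cons]; simp

theorem pvScan_spec (cs : List Char) :
    pvScan cs true = PySem.Chars.join ['\n'] ((mySplit cs).map pvLstrip) ∧
    (∀ p ps, mySplit cs = p :: ps →
      pvScan cs false = PySem.Chars.join ['\n'] (p :: ps.map pvLstrip)) := by
  induction cs with
  | nil =>
      constructor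
      · simp [pvScan, mySplit, pvLstrip, PySem.Chars.join_singleton]
      · intro p ps h
        simp [mySplit] at h
        simp [pvScan, h.1, h.2, PySem.Chars.join_singleton]
  | cons c cs ih =>
      by_cases hc : c = '\n'
      · subst hc
        have h1 : mySplit ('\n' :: cs) = [] :: mySplit cs := by simp [mySplit]
        have hne : (mySplit cs).map pvLstrip ≠ [] := by
          simp [mySplit_ne_nil cs]
        constructor
        · rw [h1]
          simp only [pvScan, if_pos rfl, List.map_cons]
          rw [join_cons_ne_nil _ _ hne, ih.1]
          simp [pvLstrip]
        · intro p ps h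
          rw [h1] at h
          cases h
          simp only [pvScan, if_pos rfl]
          rw [join_cons_ne_nil _ _ (by simp [mySplit_ne_nil cs]), ih.1]
          simp
      · cases hms : mySplit cs with
        | nil => exact absurd hms (mySplit_ne_nil cs)
        | cons q qs =>
            have h1 : mySplit (c :: cs) = (c :: q) :: qs := by
              simp [mySplit, hc, hms]
            by_cases hj : pvJunk.contains c
            · have hstrip : pvStripChars.contains c = true := by
                simp [pvJunk] at hj
                simp [pvStripChars]
                tauto
              constructor
              · rw [h1]
                simp only [pvScan, hc, if_false, hj, Bool.and_true, if_pos, List.map_cons]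
                rw [ih.1, hms]
                simp only [List.map_cons]
                congr 1
                have hmem : c ∈ pvStripChars := by simpa using hstrip
                simp [pvLstrip, List.dropWhile_cons, hmem]
              · intro p ps h
                rw [h1] at h
                cases h
                simp only [pvScan, hc, if_false, hj, Bool.and_false, ite_false]
                rw [(ih.2) q qs hms]
                cases qs with
                | nil => simp [PySem.Chars.join_singleton]
                | cons r rs =>
                    rw [join_cons_ne_nil _ _ (by simp), join_cons_ne_nil _ _ (by simp)]
                    simp
            · have hstrip : pvStripChars.contains c = false := by
                simp [pvJunk] at hj
                simp [pvStripChars, hc]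
                tauto
              constructor
              · rw [h1]
                simp only [pvScan, hc, if_false, hj, Bool.and_false, ite_false, List.map_cons]
                rw [(ih.2) q qs hms]
                have hmem : c ∉ pvStripChars := by simpa using hstrip
                have : pvLstrip (c :: q) = c :: q := by
                  simp [pvLstrip, List.dropWhile_cons, hmem]
                rw [this]
                cases qs with
                | nil => simp [PySem.Chars.join_singleton]
                | cons r rs =>
                    rw [join_cons_ne_nil _ _ (by simp), join_cons_ne_nil _ _ (by simp)]
                    simp
              · intro p ps h
                rw [h1] at h
                cases h
                simp only [pvScan, hc, if_false, Bool.false_and, ite_false]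
                rw [(ih.2) q qs hms]
                cases qs with
                | nil => simp [PySem.Chars.join_singleton]
                | cons r rs =>
                    rw [join_cons_ne_nil _ _ (by simp), join_cons_ne_nil _ _ (by simp)]
                    simp

theorem pvPopLoop_shift (ls : List (List Char)) : ∀ n, pvPopLoop ls n = n + pvPopLoop ls 0 := by
  induction ls with
  | nil => intro n; simp [pvPopLoop]
  | cons l ls ih =>
      intro n
      simp only [pvPopLoop]
      split
      · rw [ih (n+1), ih 1]; omega
      · omega

theorem drop_pvPopLoop (M : List (List Char)) :
    M.drop (pvPopLoop M 0) = M.dropWhile (· == []) := by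
  induction M with
  | nil => rfl
  | cons l ls ih =>
      simp only [pvPopLoop, List.dropWhile_cons]
      by_cases h : l = []
      · simp only [h, if_pos, beq_self_eq_true, if_true]
        rw [pvPopLoop_shift ls 1, Nat.add_comm, List.drop_succ_cons]
        exact ih
      · have : (l == ([] : List Char)) = false := by simp [h]
        simp [this, h]

theorem dropWhile_nl_join (M : List (List Char)) (h : ∀ p ∈ M, '\n' ∉ p) :
    (PySem.Chars.join ['\n'] M).dropWhile (· == '\n') =
      PySem.Chars.join ['\n'] (M.dropWhile (· == [])) := by
  induction M with
  | nil => simp [PySem.Chars.join_nil]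
  | cons p ps ih =>
      by_cases hp : p = []
      · subst hp
        rw [List.dropWhile_cons (x := ([] : List Char)), if_pos (by decide)]
        cases ps with
        | nil => simp [PySem.Chars.join_singleton, PySem.Chars.join_nil]
        | cons q qs =>
            rw [join_cons_ne_nil _ _ (by simp), List.nil_append, List.dropWhile_cons,
              if_pos (by decide)]
            exact ih (fun r hr => h r (by simp [hr]))
      · cases hq : p with
        | nil => exact absurd hq hp
        | cons c cr =>
            have hc : c ≠ '\n' := by
              intro hcn
              exact h p (by simp) (by rw [hq, hcn]; simp)
            have hjoin : ∃ t, PySem.Chars.join ['\n'] (p :: ps) = c :: t := by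
              cases ps with
              | nil => exact ⟨cr, by rw [PySem.Chars.join_singleton, hq]⟩
              | cons q qs =>
                  exact ⟨cr ++ '\n' :: PySem.Chars.join ['\n'] (q :: qs),
                    by rw [join_cons_ne_nil _ _ (by simp), hq]; simp⟩
            obtain ⟨t, ht⟩ := hjoin
            rw [← hq, ht, List.dropWhile_cons, if_neg (by simp [hc]), ← ht]
            rw [List.dropWhile_cons, if_neg (by simp [hp])]

theorem flatMap_repl_no_nl (p : List Char) (h : '\n' ∉ p) : p.flatMap pvRepl = p := by
  induction p with
  | nil => rfl
  | cons c cr ih =>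
      have hc : c ≠ '\n' := fun hcn => h (by simp [hcn])
      simp only [List.flatMap_cons, pvRepl, hc, if_false]
      rw [ih (fun hm => h (by simp [hm]))]
      simp [hc]

theorem flatMap_repl_join (M : List (List Char)) (h : ∀ p ∈ M, '\n' ∉ p) :
    (PySem.Chars.join ['\n'] M).flatMap pvRepl = PySem.Chars.join "<br>".toList M := by
  induction M with
  | nil => simp [PySem.Chars.join_nil]
  | cons p ps ih =>
      cases ps with
      | nil =>
          rw [PySem.Chars.join_singleton, PySem.Chars.join_singleton]
          exact flatMap_repl_no_nl p (h p (by simp))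
      | cons q qs =>
          rw [join_cons_ne_nil _ _ (by simp), PySem.Chars.join_cons_cons]
          rw [List.flatMap_append, flatMap_repl_no_nl p (h p (by simp))]
          simp only [List.flatMap_cons, pvRepl, if_pos rfl]
          rw [ih (fun r hr => h r (by simp [hr]))]
          simp

theorem pvPartNN_append (p : List Char) (h : '\n' ∉ p) (x : List Char) :
    pvPartNN (p ++ x) = pvPartNN x := by
  induction p with
  | nil => rfl
  | cons c cr ih =>
      have hc : c ≠ '\n' := fun hcn => h (by simp [hcn])
      simp only [List.cons_append, pvPartNN, hc, false_and, if_false]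
      exact ih (fun hm => h (by simp [hm]))

theorem main_bridge (N : List (List Char)) (hnl : ∀ p ∈ N, '\n' ∉ p)
    (hhead : N.head? ≠ some []) :
    (match pvPartNN (PySem.Chars.join ['\n'] N) with
     | none => ([] : List Char)
     | some tl => tl.flatMap pvRepl) =
    (match List.idxOf? ([] : List Char) N with
     | none => ([] : List Char)
     | some j => PySem.Chars.join "<br>".toList (N.drop (j + 1))) := by
  induction N with
  | nil => simp [PySem.Chars.join_nil, pvPartNN, List.idxOf?]
  | cons p rest ih =>
      have hp : p ≠ [] := by intro h; apply hhead; simp [h]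
      have hpnl : '\n' ∉ p := hnl p (by simp)
      have hidx : List.idxOf? ([] : List Char) (p :: rest) =
          (List.idxOf? ([] : List Char) rest).map (· + 1) := by
        rw [List.idxOf?_cons, if_neg (by simp [hp])]
      cases rest with
      | nil =>
          rw [PySem.Chars.join_singleton, hidx]
          have hnone : pvPartNN p = none := by
            have := pvPartNN_append p hpnl []
            simpa using this
          simp [hnone, List.idxOf?]
      | cons q rest' =>
          rw [join_cons_ne_nil _ _ (by simp), hidx]
          rw [pvPartNN_append p hpnl]
          by_cases hq : q = []
          · subst hq
            have hidx0 : List.idxOf? ([] : List Char) ([] :: rest') = some 0 := by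
              rw [List.idxOf?_cons, if_pos (by decide)]
            rw [hidx0]
            cases rest' with
            | nil =>
                rw [PySem.Chars.join_singleton]
                show (match pvPartNN ['\n'] with
                  | none => ([] : List Char)
                  | some tl => tl.flatMap pvRepl) = _
                have : pvPartNN ['\n'] = none := by decide
                rw [this]
                simp [PySem.Chars.join_nil]
            | cons r rest'' =>
                rw [join_cons_ne_nil ([] : List Char) (r :: rest'') (by simp), List.nil_append]
                have hpart : pvPartNN ('\n' :: '\n' :: PySem.Chars.join ['\n'] (r :: rest'')) =
                    some (PySem.Chars.join ['\n'] (r :: rest'')) := by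
                  simp [pvPartNN]
                rw [hpart]
                simp only [Option.map_some]
                rw [flatMap_repl_join (r :: rest'') (fun s hs => hnl s (by simp [hs]))]
                rfl
          · have hxcons : ∃ c t, PySem.Chars.join ['\n'] (q :: rest') = c :: t ∧ c ≠ '\n' := by
              cases hqe : q with
              | nil => exact absurd hqe hq
              | cons c cr =>
                  have hcnl : c ≠ '\n' := by
                    intro hcn
                    exact hnl q (by simp) (by rw [hqe, hcn]; simp)
                  cases rest' with
                  | nil => exact ⟨c, cr, by rw [PySem.Chars.join_singleton], hcnl⟩
                  | cons r rs =>
                      exact ⟨c, cr ++ '\n' :: PySem.Chars.join ['\n'] (r :: rs),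
                        by rw [join_cons_ne_nil _ _ (by simp)]; simp, hcnl⟩
            obtain ⟨c, t, hxt, hcnl⟩ := hxcons
            have hstep : pvPartNN ('\n' :: PySem.Chars.join ['\n'] (q :: rest')) =
                pvPartNN (PySem.Chars.join ['\n'] (q :: rest')) := by
              rw [hxt]
              show (if '\n' = '\n' ∧ (c :: t).head? = some '\n' then some (c :: t).tail
                else pvPartNN (c :: t)) = pvPartNN (c :: t)
              rw [if_neg]
              simp [hcnl]
            rw [hstep]
            have ihh := ih (fun s hs => hnl s (by simp [hs])) (by simp [hq])
            cases hpart : pvPartNN (PySem.Chars.join ['\n'] (q :: rest')) with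
            | none =>
                rw [hpart] at ihh
                cases hidx2 : List.idxOf? ([] : List Char) (q :: rest') with
                | none => simp
                | some j =>
                    rw [hidx2] at ihh
                    simp only [Option.map_some]
                    show ([] : List Char) = PySem.Chars.join "<br>".toList
                      ((p :: q :: rest').drop (j + 1 + 1))
                    rw [List.drop_succ_cons]
                    exact ihh
            | some tl =>
                rw [hpart] at ihh
                cases hidx2 : List.idxOf? ([] : List Char) (q :: rest') with
                | none => rw [hidx2] at ihh; simpa using ihh
                | some j =>
                    rw [hidx2] at ihh
                    simp only [Option.map_some]
                    show tl.flatMap pvRepl = PySem.Chars.join "<br>".toList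
                      ((p :: q :: rest').drop (j + 1 + 1))
                    rw [List.drop_succ_cons]
                    exact ihh

-- A's foldl over the popped lines, characterized by the first empty line
theorem foldl_phase_false (L : List (List Char)) : ∀ acc,
    L.foldl pvStep (acc, false) = (acc ++ L, false) := by
  induction L with
  | nil => intro acc; simp
  | cons l ls ih =>
      intro acc
      have hstep : pvStep (acc, false) l = (acc ++ [l], false) := by
        simp [pvStep]
      simp only [List.foldl_cons, hstep, ih]
      simp

theorem foldl_phase_true (L : List (List Char)) :
    L.foldl pvStep ([], true) =
    (match List.idxOf? ([] : List Char) L with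
     | none => ([], true)
     | some j => (L.drop (j + 1), false)) := by
  induction L with
  | nil => simp [List.idxOf?]
  | cons l ls ih =>
      by_cases h : l = []
      · subst h
        have hstep : pvStep (([] : List (List Char)), true) ([] : List Char) = ([], false) := by
          simp [pvStep]
        simp only [List.foldl_cons, hstep, foldl_phase_false, List.idxOf?_cons]
        simp
      · have hstep : pvStep (([] : List (List Char)), true) l = ([], true) := by
          simp [pvStep, h]
        have hbe : (l == ([] : List Char)) = false := by simp [h]
        simp only [List.foldl_cons, hstep, ih, List.idxOf?_cons, hbe]
        cases List.idxOf? ([] : List Char) ls <;> simp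

theorem head_dropWhile_empty (M : List (List Char)) :
    (M.dropWhile (· == [])).head? ≠ some ([] : List Char) := by
  induction M with
  | nil => simp
  | cons p ps ih =>
      rw [List.dropWhile_cons]
      by_cases hp : p = []
      · rw [if_pos (by simp [hp])]; exact ih
      · rw [if_neg (by simp [hp])]
        simp [hp]

theorem final_eq (cs : List Char) :
    String.ofList (PySem.Chars.join "<br>".toList
      ((PySem.List.slice ((PySem.Chars.splitOn cs ['\n']).map pvLstrip)
          (some (pvPopLoop ((PySem.Chars.splitOn cs ['\n']).map pvLstrip) 0 : Int)) none).foldl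
        pvStep ([], true)).1) =
    (match pvPartNN ((pvScan cs true).dropWhile (· == '\n')) with
     | none => ""
     | some tl => String.ofList (tl.flatMap pvRepl)) := by
  rw [splitOn_eq_mySplit]
  set M : List (List Char) := (mySplit cs).map pvLstrip with hMdef
  have hM : ∀ p ∈ M, '\n' ∉ p := by
    intro p hp
    rw [hMdef] at hp
    obtain ⟨p0, hp0, rfl⟩ := List.mem_map.mp hp
    intro hmem
    exact mem_mySplit_no_nl cs p0 hp0 ((List.dropWhile_sublist _).mem hmem)
  rw [PySem.List.slice_from M (by positivity), Int.toNat_natCast, drop_pvPopLoop M]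
  set N : List (List Char) := M.dropWhile (· == []) with hNdef
  have hN : ∀ p ∈ N, '\n' ∉ p := fun p hp => hM p ((List.dropWhile_sublist _).mem hp)
  have hNh : N.head? ≠ some ([] : List Char) := head_dropWhile_empty M
  rw [foldl_phase_true N, (pvScan_spec cs).1, ← hMdef, dropWhile_nl_join M hM, ← hNdef]
  have hmb := main_bridge N hN hNh
  cases hidx : List.idxOf? ([] : List Char) N with
  | none =>
      rw [hidx] at hmb
      cases hpart : pvPartNN (PySem.Chars.join ['\n'] N) with
      | none => simp [PySem.Chars.join_nil]
      | some tl =>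
          rw [hpart] at hmb
          dsimp only at hmb
          rw [PySem.Chars.join_nil, ← hmb]
  | some j =>
      rw [hidx] at hmb
      cases hpart : pvPartNN (PySem.Chars.join ['\n'] N) with
      | none =>
          rw [hpart] at hmb
          dsimp only at hmb
          rw [← hmb]
      | some tl =>
          rw [hpart] at hmb
          dsimp only at hmb
          rw [← hmb]

-- ===== VERDICT (by name: the statement is the Claim_ definition above) =====
theorem cleanup_comment_spec : Claim_equal_cleanup_comment := by
  intro raw _
  exact final_eq raw.toList
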